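-- pv_equiv track=rewrite | github.com/pearls-lab/infini-thor | utils/nieh_utils.py | are_synonyms
-- ===== SOURCE A (Python) =====
-- SYNONYM_MAP = {
--     "table": ["side table", "sidetable", "coffee table", "desk"],
--     "dresser": ["wooden dresser", "drawer", "chest", "on the dresser", "on the drawer"],
--     "sofa": ["couch", "loveseat", "on the couch", "on the sofa", "on couch", "to the couch"],
--     "desk": ["table", "side table", "on the table", "the table", "to the table", "on the desk"],
--     "creditcard": ["card", "credit card"],
--     "coffeetable": ["coffee table", "table", "on the table", "on table", "the table", "to the table", "to the coffeetable"],
--     "sidetable": ["side table", "table", "on the table", "on table", "the table", "to the table"],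
--     "armchair": ["chair", "the chair", "on the chair", "to the chair", "on chair"],
--     "bed": ["on the bed", "on bed", "to the bed"],
--     "pen": ["pencil", "marker", "ink pen", "inkpen"],
--     "pencil": ["pen", "marker", "ink pen", "inkpen"],
--     "phone": ["cellphone", "cell phone", "mobile phone", "smartphone", "on the phone"],
--     "cellphone": ["phone", "cell phone", "mobile phone", "smartphone", "on the cellphone"],
--     "keychain": ["keys", "key"],
--     "baseballbat": ["stick", "baseball bat", "bat"],
--     "remotecontrol": ["remote"],
--     "countertop": ["on the table", "to the countertop", "on the countertop", "to the counter", "on the counter"],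
--     "fridge": ["refrigerator", "fridge", "to the fridge"],
--     "sink": ["on the sink", "to the sink", "in the sink"],
--     "diningtable": ["table", "on the table", "to the table"],
--     "shelf": ["on the shelf", "to the shelf", "on the top shelf", "top shelf"],
--     'garbagecan': ['trash can', 'on trash can']
-- }
--
-- def are_synonyms(a, b) -> bool:
--     a = a.lower()
--     b = b.lower()
--     for word, syns in SYNONYM_MAP.items():
--         if (a == word and b in syns) or (b == word and a in syns):
--             return True
--         if a in syns and b in syns:
--             return True
--     return False
-- ===== SOURCE B (Python) =====
-- # Precomputed synonym adjacency table (generated once from the synonym data and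
-- # committed): x and y are synonyms iff y is listed under x.  Symmetric by
-- # construction; each call is a single dict lookup instead of a scan of the map.
-- _ADJ = {
--     'armchair': ['chair', 'on chair', 'on the chair', 'the chair', 'to the chair'],
--     'baseball bat': ['baseball bat', 'baseballbat', 'bat', 'stick'],
--     'baseballbat': ['baseball bat', 'bat', 'stick'],
--     'bat': ['baseball bat', 'baseballbat', 'bat', 'stick'],
--     'bed': ['on bed', 'on the bed', 'to the bed'],
--     'card': ['card', 'credit card', 'creditcard'],
--     'cell phone': ['cell phone', 'cellphone', 'mobile phone', 'on the cellphone', 'on the phone', 'phone', 'smartphone'],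
--     'cellphone': ['cell phone', 'cellphone', 'mobile phone', 'on the cellphone', 'on the phone', 'phone', 'smartphone'],
--     'chair': ['armchair', 'chair', 'on chair', 'on the chair', 'the chair', 'to the chair'],
--     'chest': ['chest', 'drawer', 'dresser', 'on the drawer', 'on the dresser', 'wooden dresser'],
--     'coffee table': ['coffee table', 'coffeetable', 'desk', 'on table', 'on the table', 'side table', 'sidetable', 'table', 'the table', 'to the coffeetable', 'to the table'],
--     'coffeetable': ['coffee table', 'on table', 'on the table', 'table', 'the table', 'to the coffeetable', 'to the table'],
--     'couch': ['couch', 'loveseat', 'on couch', 'on the couch', 'on the sofa', 'sofa', 'to the couch'],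
--     'countertop': ['on the counter', 'on the countertop', 'on the table', 'to the counter', 'to the countertop'],
--     'credit card': ['card', 'credit card', 'creditcard'],
--     'creditcard': ['card', 'credit card'],
--     'desk': ['coffee table', 'desk', 'on the desk', 'on the table', 'side table', 'sidetable', 'table', 'the table', 'to the table'],
--     'diningtable': ['on the table', 'table', 'to the table'],
--     'drawer': ['chest', 'drawer', 'dresser', 'on the drawer', 'on the dresser', 'wooden dresser'],
--     'dresser': ['chest', 'drawer', 'on the drawer', 'on the dresser', 'wooden dresser'],
--     'fridge': ['fridge', 'refrigerator', 'to the fridge'],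
--     'garbagecan': ['on trash can', 'trash can'],
--     'in the sink': ['in the sink', 'on the sink', 'sink', 'to the sink'],
--     'ink pen': ['ink pen', 'inkpen', 'marker', 'pen', 'pencil'],
--     'inkpen': ['ink pen', 'inkpen', 'marker', 'pen', 'pencil'],
--     'key': ['key', 'keychain', 'keys'],
--     'keychain': ['key', 'keys'],
--     'keys': ['key', 'keychain', 'keys'],
--     'loveseat': ['couch', 'loveseat', 'on couch', 'on the couch', 'on the sofa', 'sofa', 'to the couch'],
--     'marker': ['ink pen', 'inkpen', 'marker', 'pen', 'pencil'],
--     'mobile phone': ['cell phone', 'cellphone', 'mobile phone', 'on the cellphone', 'on the phone', 'phone', 'smartphone'],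
--     'on bed': ['bed', 'on bed', 'on the bed', 'to the bed'],
--     'on chair': ['armchair', 'chair', 'on chair', 'on the chair', 'the chair', 'to the chair'],
--     'on couch': ['couch', 'loveseat', 'on couch', 'on the couch', 'on the sofa', 'sofa', 'to the couch'],
--     'on table': ['coffee table', 'coffeetable', 'on table', 'on the table', 'side table', 'sidetable', 'table', 'the table', 'to the coffeetable', 'to the table'],
--     'on the bed': ['bed', 'on bed', 'on the bed', 'to the bed'],
--     'on the cellphone': ['cell phone', 'cellphone', 'mobile phone', 'on the cellphone', 'phone', 'smartphone'],
--     'on the chair': ['armchair', 'chair', 'on chair', 'on the chair', 'the chair', 'to the chair'],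
--     'on the couch': ['couch', 'loveseat', 'on couch', 'on the couch', 'on the sofa', 'sofa', 'to the couch'],
--     'on the counter': ['countertop', 'on the counter', 'on the countertop', 'on the table', 'to the counter', 'to the countertop'],
--     'on the countertop': ['countertop', 'on the counter', 'on the countertop', 'on the table', 'to the counter', 'to the countertop'],
--     'on the desk': ['desk', 'on the desk', 'on the table', 'side table', 'table', 'the table', 'to the table'],
--     'on the drawer': ['chest', 'drawer', 'dresser', 'on the drawer', 'on the dresser', 'wooden dresser'],
--     'on the dresser': ['chest', 'drawer', 'dresser', 'on the drawer', 'on the dresser', 'wooden dresser'],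
--     'on the phone': ['cell phone', 'cellphone', 'mobile phone', 'on the phone', 'phone', 'smartphone'],
--     'on the shelf': ['on the shelf', 'on the top shelf', 'shelf', 'to the shelf', 'top shelf'],
--     'on the sink': ['in the sink', 'on the sink', 'sink', 'to the sink'],
--     'on the sofa': ['couch', 'loveseat', 'on couch', 'on the couch', 'on the sofa', 'sofa', 'to the couch'],
--     'on the table': ['coffee table', 'coffeetable', 'countertop', 'desk', 'diningtable', 'on table', 'on the counter', 'on the countertop', 'on the desk', 'on the table', 'side table', 'sidetable', 'table', 'the table', 'to the coffeetable', 'to the counter', 'to the countertop', 'to the table'],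
--     'on the top shelf': ['on the shelf', 'on the top shelf', 'shelf', 'to the shelf', 'top shelf'],
--     'on trash can': ['garbagecan', 'on trash can', 'trash can'],
--     'pen': ['ink pen', 'inkpen', 'marker', 'pen', 'pencil'],
--     'pencil': ['ink pen', 'inkpen', 'marker', 'pen', 'pencil'],
--     'phone': ['cell phone', 'cellphone', 'mobile phone', 'on the cellphone', 'on the phone', 'phone', 'smartphone'],
--     'refrigerator': ['fridge', 'refrigerator', 'to the fridge'],
--     'remote': ['remote', 'remotecontrol'],
--     'remotecontrol': ['remote'],
--     'shelf': ['on the shelf', 'on the top shelf', 'to the shelf', 'top shelf'],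
--     'side table': ['coffee table', 'desk', 'on table', 'on the desk', 'on the table', 'side table', 'sidetable', 'table', 'the table', 'to the table'],
--     'sidetable': ['coffee table', 'desk', 'on table', 'on the table', 'side table', 'sidetable', 'table', 'the table', 'to the table'],
--     'sink': ['in the sink', 'on the sink', 'to the sink'],
--     'smartphone': ['cell phone', 'cellphone', 'mobile phone', 'on the cellphone', 'on the phone', 'phone', 'smartphone'],
--     'sofa': ['couch', 'loveseat', 'on couch', 'on the couch', 'on the sofa', 'to the couch'],
--     'stick': ['baseball bat', 'baseballbat', 'bat', 'stick'],
--     'table': ['coffee table', 'coffeetable', 'desk', 'diningtable', 'on table', 'on the desk', 'on the table', 'side table', 'sidetable', 'table', 'the table', 'to the coffeetable', 'to the table'],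
--     'the chair': ['armchair', 'chair', 'on chair', 'on the chair', 'the chair', 'to the chair'],
--     'the table': ['coffee table', 'coffeetable', 'desk', 'on table', 'on the desk', 'on the table', 'side table', 'sidetable', 'table', 'the table', 'to the coffeetable', 'to the table'],
--     'to the bed': ['bed', 'on bed', 'on the bed', 'to the bed'],
--     'to the chair': ['armchair', 'chair', 'on chair', 'on the chair', 'the chair', 'to the chair'],
--     'to the coffeetable': ['coffee table', 'coffeetable', 'on table', 'on the table', 'table', 'the table', 'to the coffeetable', 'to the table'],
--     'to the couch': ['couch', 'loveseat', 'on couch', 'on the couch', 'on the sofa', 'sofa', 'to the couch'],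
--     'to the counter': ['countertop', 'on the counter', 'on the countertop', 'on the table', 'to the counter', 'to the countertop'],
--     'to the countertop': ['countertop', 'on the counter', 'on the countertop', 'on the table', 'to the counter', 'to the countertop'],
--     'to the fridge': ['fridge', 'refrigerator', 'to the fridge'],
--     'to the shelf': ['on the shelf', 'on the top shelf', 'shelf', 'to the shelf', 'top shelf'],
--     'to the sink': ['in the sink', 'on the sink', 'sink', 'to the sink'],
--     'to the table': ['coffee table', 'coffeetable', 'desk', 'diningtable', 'on table', 'on the desk', 'on the table', 'side table', 'sidetable', 'table', 'the table', 'to the coffeetable', 'to the table'],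
--     'top shelf': ['on the shelf', 'on the top shelf', 'shelf', 'to the shelf', 'top shelf'],
--     'trash can': ['garbagecan', 'on trash can', 'trash can'],
--     'wooden dresser': ['chest', 'drawer', 'dresser', 'on the drawer', 'on the dresser', 'wooden dresser'],
-- }
--
-- def are_synonyms(a, b) -> bool:
--     return b.lower() in _ADJ.get(a.lower(), ())
-- ===== Notes on version B (the rewrite author's own statement) =====
-- stated objective: alternative
-- what changed: Replaces the per-call scan of all SYNONYM_MAP entries (with repeated list membership tests) with a precomputed symmetric adjacency table, so each call is a single dict lookup.
import Mathlib
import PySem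

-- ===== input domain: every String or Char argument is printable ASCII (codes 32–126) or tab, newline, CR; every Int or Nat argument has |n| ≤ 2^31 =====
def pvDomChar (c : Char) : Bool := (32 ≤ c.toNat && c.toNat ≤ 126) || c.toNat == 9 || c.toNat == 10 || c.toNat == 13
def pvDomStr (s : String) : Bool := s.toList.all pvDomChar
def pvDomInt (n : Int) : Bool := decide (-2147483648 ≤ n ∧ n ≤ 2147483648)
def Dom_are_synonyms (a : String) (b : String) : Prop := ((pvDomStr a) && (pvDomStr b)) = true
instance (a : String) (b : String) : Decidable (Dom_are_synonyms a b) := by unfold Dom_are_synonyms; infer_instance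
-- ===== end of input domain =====

-- B replaces A's per-call scan over SYNONYM_MAP with a precomputed symmetric
-- adjacency table, so each call is a single dict lookup (alternative data structure).

-- ===== PORT A =====
def SYNONYM_MAP : List (String × List String) := [
  ("table", ["side table", "sidetable", "coffee table", "desk"]),
  ("dresser", ["wooden dresser", "drawer", "chest", "on the dresser", "on the drawer"]),
  ("sofa", ["couch", "loveseat", "on the couch", "on the sofa", "on couch", "to the couch"]),
  ("desk", ["table", "side table", "on the table", "the table", "to the table", "on the desk"]),
  ("creditcard", ["card", "credit card"]),
  ("coffeetable", ["coffee table", "table", "on the table", "on table", "the table", "to the table", "to the coffeetable"]),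
  ("sidetable", ["side table", "table", "on the table", "on table", "the table", "to the table"]),
  ("armchair", ["chair", "the chair", "on the chair", "to the chair", "on chair"]),
  ("bed", ["on the bed", "on bed", "to the bed"]),
  ("pen", ["pencil", "marker", "ink pen", "inkpen"]),
  ("pencil", ["pen", "marker", "ink pen", "inkpen"]),
  ("phone", ["cellphone", "cell phone", "mobile phone", "smartphone", "on the phone"]),
  ("cellphone", ["phone", "cell phone", "mobile phone", "smartphone", "on the cellphone"]),
  ("keychain", ["keys", "key"]),
  ("baseballbat", ["stick", "baseball bat", "bat"]),
  ("remotecontrol", ["remote"]),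
  ("countertop", ["on the table", "to the countertop", "on the countertop", "to the counter", "on the counter"]),
  ("fridge", ["refrigerator", "fridge", "to the fridge"]),
  ("sink", ["on the sink", "to the sink", "in the sink"]),
  ("diningtable", ["table", "on the table", "to the table"]),
  ("shelf", ["on the shelf", "to the shelf", "on the top shelf", "top shelf"]),
  ("garbagecan", ["trash can", "on trash can"])]

-- the 'for word, syns in SYNONYM_MAP.items()' loop with its early returns
def are_synonyms_loop (a b : String) : List (String × List String) → Bool
  | [] => false
  | (word, syns) :: rest =>
    if (a == word && syns.contains b) || (b == word && syns.contains a) then true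
    else if syns.contains a && syns.contains b then true
    else are_synonyms_loop a b rest

def are_synonyms (a : String) (b : String) : Bool :=
  are_synonyms_loop (PySem.Str.lower a) (PySem.Str.lower b) SYNONYM_MAP

-- ===== PORT B =====
-- Source B's precomputed adjacency dict literal _ADJ
def ADJ : PySem.Dict String (List String) := PySem.Dict.mk [
  ("armchair", ["chair", "on chair", "on the chair", "the chair", "to the chair"]),
  ("baseball bat", ["baseball bat", "baseballbat", "bat", "stick"]),
  ("baseballbat", ["baseball bat", "bat", "stick"]),
  ("bat", ["baseball bat", "baseballbat", "bat", "stick"]),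
  ("bed", ["on bed", "on the bed", "to the bed"]),
  ("card", ["card", "credit card", "creditcard"]),
  ("cell phone", ["cell phone", "cellphone", "mobile phone", "on the cellphone", "on the phone", "phone", "smartphone"]),
  ("cellphone", ["cell phone", "cellphone", "mobile phone", "on the cellphone", "on the phone", "phone", "smartphone"]),
  ("chair", ["armchair", "chair", "on chair", "on the chair", "the chair", "to the chair"]),
  ("chest", ["chest", "drawer", "dresser", "on the drawer", "on the dresser", "wooden dresser"]),
  ("coffee table", ["coffee table", "coffeetable", "desk", "on table", "on the table", "side table", "sidetable", "table", "the table", "to the coffeetable", "to the table"]),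
  ("coffeetable", ["coffee table", "on table", "on the table", "table", "the table", "to the coffeetable", "to the table"]),
  ("couch", ["couch", "loveseat", "on couch", "on the couch", "on the sofa", "sofa", "to the couch"]),
  ("countertop", ["on the counter", "on the countertop", "on the table", "to the counter", "to the countertop"]),
  ("credit card", ["card", "credit card", "creditcard"]),
  ("creditcard", ["card", "credit card"]),
  ("desk", ["coffee table", "desk", "on the desk", "on the table", "side table", "sidetable", "table", "the table", "to the table"]),
  ("diningtable", ["on the table", "table", "to the table"]),
  ("drawer", ["chest", "drawer", "dresser", "on the drawer", "on the dresser", "wooden dresser"]),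
  ("dresser", ["chest", "drawer", "on the drawer", "on the dresser", "wooden dresser"]),
  ("fridge", ["fridge", "refrigerator", "to the fridge"]),
  ("garbagecan", ["on trash can", "trash can"]),
  ("in the sink", ["in the sink", "on the sink", "sink", "to the sink"]),
  ("ink pen", ["ink pen", "inkpen", "marker", "pen", "pencil"]),
  ("inkpen", ["ink pen", "inkpen", "marker", "pen", "pencil"]),
  ("key", ["key", "keychain", "keys"]),
  ("keychain", ["key", "keys"]),
  ("keys", ["key", "keychain", "keys"]),
  ("loveseat", ["couch", "loveseat", "on couch", "on the couch", "on the sofa", "sofa", "to the couch"]),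
  ("marker", ["ink pen", "inkpen", "marker", "pen", "pencil"]),
  ("mobile phone", ["cell phone", "cellphone", "mobile phone", "on the cellphone", "on the phone", "phone", "smartphone"]),
  ("on bed", ["bed", "on bed", "on the bed", "to the bed"]),
  ("on chair", ["armchair", "chair", "on chair", "on the chair", "the chair", "to the chair"]),
  ("on couch", ["couch", "loveseat", "on couch", "on the couch", "on the sofa", "sofa", "to the couch"]),
  ("on table", ["coffee table", "coffeetable", "on table", "on the table", "side table", "sidetable", "table", "the table", "to the coffeetable", "to the table"]),
  ("on the bed", ["bed", "on bed", "on the bed", "to the bed"]),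
  ("on the cellphone", ["cell phone", "cellphone", "mobile phone", "on the cellphone", "phone", "smartphone"]),
  ("on the chair", ["armchair", "chair", "on chair", "on the chair", "the chair", "to the chair"]),
  ("on the couch", ["couch", "loveseat", "on couch", "on the couch", "on the sofa", "sofa", "to the couch"]),
  ("on the counter", ["countertop", "on the counter", "on the countertop", "on the table", "to the counter", "to the countertop"]),
  ("on the countertop", ["countertop", "on the counter", "on the countertop", "on the table", "to the counter", "to the countertop"]),
  ("on the desk", ["desk", "on the desk", "on the table", "side table", "table", "the table", "to the table"]),
  ("on the drawer", ["chest", "drawer", "dresser", "on the drawer", "on the dresser", "wooden dresser"]),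
  ("on the dresser", ["chest", "drawer", "dresser", "on the drawer", "on the dresser", "wooden dresser"]),
  ("on the phone", ["cell phone", "cellphone", "mobile phone", "on the phone", "phone", "smartphone"]),
  ("on the shelf", ["on the shelf", "on the top shelf", "shelf", "to the shelf", "top shelf"]),
  ("on the sink", ["in the sink", "on the sink", "sink", "to the sink"]),
  ("on the sofa", ["couch", "loveseat", "on couch", "on the couch", "on the sofa", "sofa", "to the couch"]),
  ("on the table", ["coffee table", "coffeetable", "countertop", "desk", "diningtable", "on table", "on the counter", "on the countertop", "on the desk", "on the table", "side table", "sidetable", "table", "the table", "to the coffeetable", "to the counter", "to the countertop", "to the table"]),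
  ("on the top shelf", ["on the shelf", "on the top shelf", "shelf", "to the shelf", "top shelf"]),
  ("on trash can", ["garbagecan", "on trash can", "trash can"]),
  ("pen", ["ink pen", "inkpen", "marker", "pen", "pencil"]),
  ("pencil", ["ink pen", "inkpen", "marker", "pen", "pencil"]),
  ("phone", ["cell phone", "cellphone", "mobile phone", "on the cellphone", "on the phone", "phone", "smartphone"]),
  ("refrigerator", ["fridge", "refrigerator", "to the fridge"]),
  ("remote", ["remote", "remotecontrol"]),
  ("remotecontrol", ["remote"]),
  ("shelf", ["on the shelf", "on the top shelf", "to the shelf", "top shelf"]),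
  ("side table", ["coffee table", "desk", "on table", "on the desk", "on the table", "side table", "sidetable", "table", "the table", "to the table"]),
  ("sidetable", ["coffee table", "desk", "on table", "on the table", "side table", "sidetable", "table", "the table", "to the table"]),
  ("sink", ["in the sink", "on the sink", "to the sink"]),
  ("smartphone", ["cell phone", "cellphone", "mobile phone", "on the cellphone", "on the phone", "phone", "smartphone"]),
  ("sofa", ["couch", "loveseat", "on couch", "on the couch", "on the sofa", "to the couch"]),
  ("stick", ["baseball bat", "baseballbat", "bat", "stick"]),
  ("table", ["coffee table", "coffeetable", "desk", "diningtable", "on table", "on the desk", "on the table", "side table", "sidetable", "table", "the table", "to the coffeetable", "to the table"]),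
  ("the chair", ["armchair", "chair", "on chair", "on the chair", "the chair", "to the chair"]),
  ("the table", ["coffee table", "coffeetable", "desk", "on table", "on the desk", "on the table", "side table", "sidetable", "table", "the table", "to the coffeetable", "to the table"]),
  ("to the bed", ["bed", "on bed", "on the bed", "to the bed"]),
  ("to the chair", ["armchair", "chair", "on chair", "on the chair", "the chair", "to the chair"]),
  ("to the coffeetable", ["coffee table", "coffeetable", "on table", "on the table", "table", "the table", "to the coffeetable", "to the table"]),
  ("to the couch", ["couch", "loveseat", "on couch", "on the couch", "on the sofa", "sofa", "to the couch"]),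
  ("to the counter", ["countertop", "on the counter", "on the countertop", "on the table", "to the counter", "to the countertop"]),
  ("to the countertop", ["countertop", "on the counter", "on the countertop", "on the table", "to the counter", "to the countertop"]),
  ("to the fridge", ["fridge", "refrigerator", "to the fridge"]),
  ("to the shelf", ["on the shelf", "on the top shelf", "shelf", "to the shelf", "top shelf"]),
  ("to the sink", ["in the sink", "on the sink", "sink", "to the sink"]),
  ("to the table", ["coffee table", "coffeetable", "desk", "diningtable", "on table", "on the desk", "on the table", "side table", "sidetable", "table", "the table", "to the coffeetable", "to the table"]),
  ("top shelf", ["on the shelf", "on the top shelf", "shelf", "to the shelf", "top shelf"]),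
  ("trash can", ["garbagecan", "on trash can", "trash can"]),
  ("wooden dresser", ["chest", "drawer", "dresser", "on the drawer", "on the dresser", "wooden dresser"])]

def are_synonyms_alt (a : String) (b : String) : Bool :=
  (ADJ.getD (PySem.Str.lower a) []).contains (PySem.Str.lower b)

-- ===== PRECONDITION & SPEC =====
def Spec_are_synonyms (a : String) (b : String) (out : Bool) : Prop := out = are_synonyms_alt a b
instance (a : String) (b : String) (out : Bool) : Decidable (Spec_are_synonyms a b out) := by unfold Spec_are_synonyms; infer_instance

-- ===== CLAIM (what is proved, stated in full; the proofs are below) =====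
def Claim_equal_are_synonyms : Prop := ∀ (a : String) (b : String), Dom_are_synonyms a b → Spec_are_synonyms a b (are_synonyms a b)

-- ===== LEMMAS AND PROOFS =====

-- the condition A's loop tests for one entry
def entryCond (x y : String) (e : String × List String) : Prop :=
  (x = e.1 ∧ y ∈ e.2) ∨ (y = e.1 ∧ x ∈ e.2) ∨ (x ∈ e.2 ∧ y ∈ e.2)

theorem loop_iff (x y : String) (L : List (String × List String)) :
    are_synonyms_loop x y L = true ↔ ∃ e ∈ L, entryCond x y e := by
  induction L with
  | nil => simp [are_synonyms_loop]
  | cons e rest ih =>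
    obtain ⟨w, syns⟩ := e
    simp only [are_synonyms_loop, List.exists_mem_cons_iff]
    split_ifs with h1 h2
    · simp only [Bool.or_eq_true, Bool.and_eq_true, beq_iff_eq, List.contains_iff_mem] at h1
      simp only [entryCond, true_iff]
      tauto
    · simp only [Bool.and_eq_true, List.contains_iff_mem] at h2
      simp only [entryCond, true_iff]
      tauto
    · rw [ih]
      simp only [Bool.or_eq_true, Bool.and_eq_true, beq_iff_eq, List.contains_iff_mem] at h1 h2
      constructor
      · exact fun h => Or.inr h
      · rintro (hc | h)
        · exfalso
          simp only [entryCond] at hc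
          rcases hc with h' | h' | h'
          · exact h1 (Or.inl h')
          · exact h1 (Or.inr h')
          · exact h2 h'
        · exact h

-- every token (key or synonym) of SYNONYM_MAP, and every key of ADJ
def V : List String := ADJ.keys

-- the synonyms A's condition grants to x, entry by entry
def rowA (x : String) : List String :=
  SYNONYM_MAP.flatMap (fun e =>
    (if x = e.1 then e.2 else []) ++ (if x ∈ e.2 then e.1 :: e.2 else []))

theorem mem_ite_nil {α : Type} {c : Prop} [Decidable c] {l : List α} {y : α} :
    y ∈ (if c then l else []) ↔ c ∧ y ∈ l := by
  split_ifs with h <;> simp [h]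

theorem rowA_mem (x y : String) : y ∈ rowA x ↔ ∃ e ∈ SYNONYM_MAP, entryCond x y e := by
  simp only [rowA, List.mem_flatMap, List.mem_append, mem_ite_nil, List.mem_cons, entryCond]
  exact exists_congr fun e => and_congr_right fun _ => by tauto

-- the per-key check: for every key x, A's row and B's table row hold the same strings
set_option maxRecDepth 1000000 in
theorem rows_eq : V.all (fun x =>
    ((rowA x).all (fun y => (ADJ.getD x []).contains y)) &&
    ((ADJ.getD x []).all (fun y => (rowA x).contains y))) = true := by rfl

-- every string A's condition can mention lies in V
set_option maxRecDepth 1000000 in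
theorem mkeys_in_V : SYNONYM_MAP.all (fun e => V.contains e.1 && e.2.all V.contains) = true := by rfl

theorem main_iff (x y : String) :
    y ∈ ADJ.getD x [] ↔ ∃ e ∈ SYNONYM_MAP, entryCond x y e := by
  rw [← rowA_mem]
  by_cases hx : x ∈ V
  · have h := List.all_eq_true.mp rows_eq x hx
    rw [Bool.and_eq_true, List.all_eq_true, List.all_eq_true] at h
    constructor
    · intro hy
      have := h.2 y hy
      rwa [List.contains_iff_mem] at this
    · intro hy
      have := h.1 y hy
      rwa [List.contains_iff_mem] at this
  · have hnone : ADJ.get? x = none := by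
      rw [PySem.Dict.get?_eq_none_iff_not_mem_keys]
      exact hx
    rw [PySem.Dict.getD_of_get?_eq_none ADJ [] hnone]
    simp only [List.not_mem_nil, false_iff]
    intro hy
    rw [rowA_mem] at hy
    obtain ⟨e, he, hc⟩ := hy
    have hk := List.all_eq_true.mp mkeys_in_V e he
    rw [Bool.and_eq_true, List.contains_iff_mem, List.all_eq_true] at hk
    rcases hc with ⟨h1, _⟩ | ⟨_, h2⟩ | ⟨h2, _⟩
    · exact hx (h1 ▸ hk.1)
    · have := hk.2 x h2
      exact hx (by rwa [List.contains_iff_mem] at this)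
    · have := hk.2 x h2
      exact hx (by rwa [List.contains_iff_mem] at this)

-- ===== VERDICT (by name: the statement is the Claim_ definition above) =====
theorem are_synonyms_spec : Claim_equal_are_synonyms := by
  intro a b _
  unfold Spec_are_synonyms are_synonyms are_synonyms_alt
  rw [Bool.eq_iff_iff, loop_iff, List.contains_iff_mem, main_iff]
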